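-- pv_equiv track=rewrite | github.com/playstationvrtuga-boop/tcgsniperdeals | vip_app/app/main.py | parse_set_filter
-- ===== SOURCE A (Python) =====
-- SET_FILTER_OPTIONS = [
--     ("PFL", "PFL - Phantasmal Flames"),
--     ("MEG", "MEG - Mega Evolution"),
--     ("PRE", "PRE - Prismatic Evolutions"),
--     ("SSP", "SSP - Surging Sparks"),
--     ("TWM", "TWM - Twilight Masquerade"),
--     ("TEF", "TEF - Temporal Forces"),
--     ("PAF", "PAF - Paldean Fates"),
--     ("OBF", "OBF - Obsidian Flames"),
--     ("PAL", "PAL - Paldea Evolved"),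
--     ("SVI", "SVI - Scarlet & Violet"),
--     ("CRZ", "CRZ - Crown Zenith"),
--     ("EVS", "EVS - Evolving Skies"),
--     ("BRS", "BRS - Brilliant Stars"),
--     ("FST", "FST - Fusion Strike"),
--     ("CEL", "CEL - Celebrations"),
-- ]
--
-- def parse_set_filter(raw_value: str) -> list[str]:
--     allowed = {value for value, _label in SET_FILTER_OPTIONS}
--     selected = []
--     for item in (raw_value or "").split(","):
--         value = item.strip().upper()
--         if value in allowed and value not in selected:
--             selected.append(value)
--     return selected
-- ===== SOURCE B (Python) =====
-- SET_FILTER_OPTIONS = [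
--     ("PFL", "PFL - Phantasmal Flames"),
--     ("MEG", "MEG - Mega Evolution"),
--     ("PRE", "PRE - Prismatic Evolutions"),
--     ("SSP", "SSP - Surging Sparks"),
--     ("TWM", "TWM - Twilight Masquerade"),
--     ("TEF", "TEF - Temporal Forces"),
--     ("PAF", "PAF - Paldean Fates"),
--     ("OBF", "OBF - Obsidian Flames"),
--     ("PAL", "PAL - Paldea Evolved"),
--     ("SVI", "SVI - Scarlet & Violet"),
--     ("CRZ", "CRZ - Crown Zenith"),
--     ("EVS", "EVS - Evolving Skies"),
--     ("BRS", "BRS - Brilliant Stars"),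
--     ("FST", "FST - Fusion Strike"),
--     ("CEL", "CEL - Celebrations"),
-- ]
--
-- def parse_set_filter(raw_value: str) -> list[str]:
--     # Scan the catalogue instead of the input: keep the catalogue codes that occur
--     # among the normalized tokens, then order them by first occurrence in the input.
--     tokens = [item.strip().upper() for item in (raw_value or "").split(",")]
--     present = [code for code, _label in SET_FILTER_OPTIONS if code in tokens]
--     return sorted(present, key=tokens.index)
-- ===== Notes on version B (the rewrite author's own statement) =====
-- stated objective: alternative
-- what changed: Instead of A's single streaming loop over the tokens with a growing accumulator of already-selected codes, B scans the fixed catalogue: it filters the catalogue codes by membership in the normalized token list and then sorts the survivors by their first-occurrence index (tokens.index), so dedup and output order come from the sort key rather than from an accumulator.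
import Mathlib
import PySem

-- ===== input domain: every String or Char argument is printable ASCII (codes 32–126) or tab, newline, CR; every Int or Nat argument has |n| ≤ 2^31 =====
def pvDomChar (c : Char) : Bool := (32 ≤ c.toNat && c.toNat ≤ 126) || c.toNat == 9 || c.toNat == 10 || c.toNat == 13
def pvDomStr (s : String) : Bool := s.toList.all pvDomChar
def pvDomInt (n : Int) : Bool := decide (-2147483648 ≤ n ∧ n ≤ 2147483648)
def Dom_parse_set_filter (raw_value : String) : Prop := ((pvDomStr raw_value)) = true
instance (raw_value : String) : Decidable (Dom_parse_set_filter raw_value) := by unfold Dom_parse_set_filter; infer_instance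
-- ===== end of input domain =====

-- B scans the fixed catalogue instead of streaming the tokens: it keeps the catalogue codes that
-- occur among the normalized tokens and sorts them by first occurrence in the input — replacing
-- A's single token loop with its growing accumulator. Objective: alternative.


-- module constant SET_FILTER_OPTIONS (shared context of both implementations)
def SET_FILTER_OPTIONS : List (String × String) := [
  ("PFL", "PFL - Phantasmal Flames"),
  ("MEG", "MEG - Mega Evolution"),
  ("PRE", "PRE - Prismatic Evolutions"),
  ("SSP", "SSP - Surging Sparks"),
  ("TWM", "TWM - Twilight Masquerade"),
  ("TEF", "TEF - Temporal Forces"),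
  ("PAF", "PAF - Paldean Fates"),
  ("OBF", "OBF - Obsidian Flames"),
  ("PAL", "PAL - Paldea Evolved"),
  ("SVI", "SVI - Scarlet & Violet"),
  ("CRZ", "CRZ - Crown Zenith"),
  ("EVS", "EVS - Evolving Skies"),
  ("BRS", "BRS - Brilliant Stars"),
  ("FST", "FST - Fusion Strike"),
  ("CEL", "CEL - Celebrations")]

-- ===== PORT A =====
def parse_set_filter (raw_value : String) : List String :=
  let allowed : PySem.Set String := PySem.Set.ofList (SET_FILTER_OPTIONS.map (fun p => p.1))
  -- (raw_value or ""): "" when raw_value is falsy ("" itself), else raw_value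
  let r := if raw_value == "" then "" else raw_value
  ((PySem.Str.split? r ",").getD []).foldl
    (fun selected item =>
      let value := PySem.Str.upper (PySem.Str.strip item)
      if PySem.Set.contains allowed value && !(selected.contains value)
      then selected ++ [value] else selected) []

-- ===== PORT B =====
def parse_set_filter_alt (raw_value : String) : List String :=
  let r := if raw_value == "" then "" else raw_value
  let tokens := ((PySem.Str.split? r ",").getD []).map
    (fun item => PySem.Str.upper (PySem.Str.strip item))
  let present := SET_FILTER_OPTIONS.filterMap
    (fun p => if tokens.contains p.1 then some p.1 else none)
  -- sort key tokens.index: every element of present is in tokens, so index? is some there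
  -- and '.getD 0' is exact (Python list.index of a present element)
  PySem.List.sorted present (fun code => (PySem.List.index? tokens code).getD 0) false

-- ===== PRECONDITION & SPEC =====
def Spec_parse_set_filter (raw_value : String) (out : List String) : Prop := out = parse_set_filter_alt raw_value
instance (raw_value : String) (out : List String) : Decidable (Spec_parse_set_filter raw_value out) := by unfold Spec_parse_set_filter; infer_instance

-- ===== CLAIM (what is proved, stated in full; the proofs are below) =====
def Claim_equal_parse_set_filter : Prop := ∀ (raw_value : String), Dom_parse_set_filter raw_value → Spec_parse_set_filter raw_value (parse_set_filter raw_value)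

-- ===== LEMMAS AND PROOFS =====

-- A's in-loop accumulator over the raw tokens is the Set.add fold over the filtered tokens.
theorem foldA_eq_foldl_add (p : String → Bool) (f : String → String) :
    ∀ (xs : List String) (s : List String),
      xs.foldl (fun sel item =>
        let value := f item
        if p value && !(sel.contains value) then sel ++ [value] else sel) s
      = ((xs.map f).filter p).foldl PySem.Set.add s := by
  have hfun : (fun (sel : List String) (item : String) =>
        let value := f item
        if p value && !(sel.contains value) then sel ++ [value] else sel)
      = (fun sel item => if p (f item) then PySem.Set.add sel (f item) else sel) := by
    funext sel item
    simp only [PySem.Set.add]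
    cases hp : p (f item) <;> cases hc : sel.contains (f item) <;> simp_all
  suffices h : ∀ (xs : List String) (s : List String),
      xs.foldl (fun sel item => if p (f item) then PySem.Set.add sel (f item) else sel) s
      = ((xs.map f).filter p).foldl PySem.Set.add s by
    intro xs s
    rw [hfun]
    exact h xs s
  intro xs
  induction xs with
  | nil => intro s; rfl
  | cons x xs ih =>
    intro s
    simp only [List.foldl_cons, List.map_cons, List.filter_cons]
    cases hp : p (f x)
    · simp only [Bool.false_eq_true, if_false]
      exact ih s
    · simp only [if_true, List.foldl_cons]
      exact ih _

-- dedup commutes with filter (first occurrences are preserved).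
theorem foldl_add_filter (p : String → Bool) :
    ∀ (xs : List String) (t : List String),
      ((xs.filter p).foldl PySem.Set.add (t.filter p)) = (xs.foldl PySem.Set.add t).filter p := by
  intro xs
  induction xs with
  | nil => intro t; rfl
  | cons x xs ih =>
    intro t
    simp only [List.filter_cons]
    by_cases hp : p x
    · have hmem : (List.filter p t).contains x = t.contains x := by
        simp [List.mem_filter, hp]
      have hadd : PySem.Set.add (t.filter p) x = (PySem.Set.add t x).filter p := by
        simp only [PySem.Set.add, PySem.Set.contains, hmem]
        by_cases hc : x ∈ t
        · simp [hc]
        · simp [hc, List.filter_append, hp]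
      simp only [hp, if_pos, List.foldl_cons, hadd]
      exact ih (PySem.Set.add t x)
    · have hadd : (PySem.Set.add t x).filter p = t.filter p := by
        simp only [PySem.Set.add]
        by_cases hc : x ∈ t
        · simp [hc]
        · simp [hc, List.filter_append, hp]
      simp only [hp, Bool.false_eq_true, if_false, List.foldl_cons, ← hadd]
      rw [ih (PySem.Set.add t x)]

-- foldl of Set.add from accumulator s appends the fresh part of dedup xs.
theorem foldl_add_split : ∀ (xs s : List String),
    xs.foldl PySem.Set.add s = s ++ (PySem.List.dedup xs).filter (fun y => !s.contains y) := by
  intro xs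
  induction xs with
  | nil => intro s; simp [PySem.List.dedup, PySem.Set.ofList, PySem.Set.empty]
  | cons x xs ih =>
    intro s
    have hd : PySem.List.dedup (x :: xs)
        = x :: (PySem.List.dedup xs).filter (fun y => !(y == x)) := by
      calc PySem.List.dedup (x :: xs)
          = xs.foldl PySem.Set.add [x] := by
            simp [PySem.List.dedup, PySem.Set.ofList, PySem.Set.empty]
        _ = [x] ++ (PySem.List.dedup xs).filter (fun y => !([x].contains y)) := ih [x]
        _ = x :: (PySem.List.dedup xs).filter (fun y => !(y == x)) := by
            simp only [List.singleton_append, List.cons.injEq, true_and]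
            apply List.filter_congr
            intro y _
            by_cases hyx : y = x
            · subst hyx; simp
            · simp [hyx]
    rw [List.foldl_cons, ih (PySem.Set.add s x), hd]
    by_cases hc : x ∈ s
    · have hadd : PySem.Set.add s x = s := by simp [PySem.Set.add, hc]
      rw [hadd, List.filter_cons]
      have hx : (!s.contains x) = false := by simp [hc]
      rw [hx]
      simp only [Bool.false_eq_true, if_false]
      congr 1
      rw [List.filter_filter]
      apply List.filter_congr
      intro y _
      by_cases hyx : y = x
      · subst hyx; simp [hc]
      · simp [hyx]
    · have hadd : PySem.Set.add s x = s ++ [x] := by simp [PySem.Set.add, hc]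
      rw [hadd, List.filter_cons]
      have hx : (!s.contains x) = true := by simp [hc]
      rw [hx]
      simp only [if_true, List.append_assoc, List.singleton_append]
      congr 2
      rw [List.filter_filter]
      apply List.filter_congr
      intro y _
      simp
      tauto

-- dedup lists values in order of FIRST OCCURRENCE: indices strictly increase along dedup xs.
theorem dedup_pairwise_idx (xs : List String) :
    (PySem.List.dedup xs).Pairwise
      (fun a b => (PySem.List.index? xs a).getD 0 < (PySem.List.index? xs b).getD 0) := by
  induction xs with
  | nil => simp [PySem.List.dedup, PySem.Set.ofList, PySem.Set.empty]
  | cons x xs ih =>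
    have hd : PySem.List.dedup (x :: xs)
        = x :: (PySem.List.dedup xs).filter (fun y => !(y == x)) := by
      have h0 : PySem.Set.add ([] : List String) x = [x] := by simp [PySem.Set.add]
      have := foldl_add_split xs [x]
      simp only [PySem.List.dedup, PySem.Set.ofList, PySem.Set.empty, List.foldl_cons, h0] at this ⊢
      rw [this]
      simp only [List.singleton_append, List.cons.injEq, true_and]
      apply List.filter_congr
      intro y _
      by_cases hyx : y = x
      · subst hyx; simp
      · simp [hyx]
    rw [hd]
    constructor
    · intro b hb
      rw [List.mem_filter] at hb
      obtain ⟨hbd, hbx⟩ := hb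
      have hbne : b ≠ x := by simpa using hbx
      have hbxs : b ∈ xs := by
        have := (PySem.List.dedup_eq_ofList xs) ▸ hbd
        exact (PySem.Set.mem_ofList xs b).mp this
      rw [PySem.List.index?_cons_self, PySem.List.index?_cons_of_ne xs (Ne.symm hbne)]
      have hsome : (PySem.List.index? xs b).isSome := (PySem.List.index?_isSome_iff xs b).mpr hbxs
      obtain ⟨j, hj⟩ := Option.isSome_iff_exists.mp hsome
      simp only [PySem.List.index?_eq_idxOf?] at hj
      simp [hj]
    · have hfil := List.Pairwise.filter (l := PySem.List.dedup xs) (fun y => !(y == x)) ih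
      refine hfil.imp_of_mem ?_
      intro a b ha hb hab
      rw [List.mem_filter] at ha hb
      have hane : a ≠ x := by simpa using ha.2
      have hbne : b ≠ x := by simpa using hb.2
      have haxs : a ∈ xs := by
        have := (PySem.List.dedup_eq_ofList xs) ▸ ha.1
        exact (PySem.Set.mem_ofList xs a).mp this
      have hbxs : b ∈ xs := by
        have := (PySem.List.dedup_eq_ofList xs) ▸ hb.1
        exact (PySem.Set.mem_ofList xs b).mp this
      rw [PySem.List.index?_cons_of_ne xs (Ne.symm hane),
          PySem.List.index?_cons_of_ne xs (Ne.symm hbne)]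
      obtain ⟨i, hi⟩ := Option.isSome_iff_exists.mp ((PySem.List.index?_isSome_iff xs a).mpr haxs)
      obtain ⟨j, hj⟩ := Option.isSome_iff_exists.mp ((PySem.List.index?_isSome_iff xs b).mpr hbxs)
      rw [hi, hj] at hab ⊢
      simpa using hab

-- B's comprehension over the option pairs is the filter of the code list.
theorem filterMap_fst (g : String → Bool) : ∀ (l : List (String × String)),
    l.filterMap (fun p => if g p.1 then some p.1 else none)
      = (l.map Prod.fst).filter g := by
  intro l
  induction l with
  | nil => rfl
  | cons p l ih =>
    simp only [List.filterMap_cons, List.map_cons, List.filter_cons]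
    by_cases hg : g p.1
    · simp [hg, ih]
    · simp [hg, ih]

-- present ~ filter p (dedup tokens)
theorem perm_present (tokens : List String) :
    ((PySem.List.dedup tokens).filter
        (fun v => PySem.Set.contains (PySem.Set.ofList (SET_FILTER_OPTIONS.map (fun p => p.1))) v)).Perm
      (SET_FILTER_OPTIONS.filterMap (fun p => if tokens.contains p.1 then some p.1 else none)) := by
  rw [filterMap_fst]
  have hnod1 : ((PySem.List.dedup tokens).filter
      (fun v => PySem.Set.contains (PySem.Set.ofList (SET_FILTER_OPTIONS.map (fun p => p.1))) v)).Nodup :=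
    (PySem.List.nodup_dedup tokens).filter _
  have hnod2 : ((SET_FILTER_OPTIONS.map Prod.fst).filter (fun c => tokens.contains c)).Nodup := by
    apply List.Nodup.filter
    decide
  rw [List.perm_ext_iff_of_nodup hnod1 hnod2]
  intro a
  simp only [List.mem_filter, PySem.List.dedup_eq_ofList, PySem.Set.mem_ofList]
  constructor
  · rintro ⟨hat, hc⟩
    refine ⟨?_, by simpa using hat⟩
    have : a ∈ PySem.Set.ofList (SET_FILTER_OPTIONS.map (fun p => p.1)) := by
      simpa [PySem.Set.contains] using hc
    simpa using (PySem.Set.mem_ofList _ a).mp this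
  · rintro ⟨hac, hat⟩
    refine ⟨by simpa using hat, ?_⟩
    have : a ∈ PySem.Set.ofList (SET_FILTER_OPTIONS.map (fun p => p.1)) :=
      (PySem.Set.mem_ofList _ a).mpr hac
    simpa [PySem.Set.contains] using this

-- ===== VERDICT (by name: the statement is the Claim_ definition above) =====
theorem parse_set_filter_spec : Claim_equal_parse_set_filter := by
  intro raw_value _
  unfold Spec_parse_set_filter parse_set_filter parse_set_filter_alt
  simp only []
  rw [foldA_eq_foldl_add]
  have hA := foldl_add_filter
    (fun v => PySem.Set.contains (PySem.Set.ofList (SET_FILTER_OPTIONS.map (fun p => p.1))) v)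
    (((PySem.Str.split? (if raw_value == "" then "" else raw_value) ",").getD []).map
      (fun item => PySem.Str.upper (PySem.Str.strip item))) []
  simp only [List.filter_nil] at hA
  set tokens := ((PySem.Str.split? (if raw_value == "" then "" else raw_value) ",").getD []).map
      (fun item => PySem.Str.upper (PySem.Str.strip item)) with htok
  have hded : tokens.foldl PySem.Set.add [] = PySem.List.dedup tokens := by
    simp [PySem.List.dedup, PySem.Set.ofList, PySem.Set.empty]
  rw [hA, hded]
  symm
  apply PySem.List.sorted_eq_of_perm_of_pairwise_lt
  · exact perm_present tokens
  · exact List.Pairwise.filter _ (dedup_pairwise_idx tokens)
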